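-- pv_equiv track=rewrite | github.com/y2gcoder/coding-test | programmers/question/0/ranking.py | solution
-- ===== SOURCE A (Python) =====
-- def solution(score):
--     answer = []
--     sorted_array = sorted(score, key=lambda x: sum(x), reverse=True)
--     rank_dic = dict()
--     ranking = 1
--     for i in sorted_array:
--         current_sum = sum(i)
--         if current_sum not in rank_dic.keys():
--             rank_dic[current_sum] = ranking
--         ranking += 1
--
--     for i in score:
--         answer.append(rank_dic[sum(i)])
--
--     return answer
-- ===== SOURCE B (Python) =====
-- def solution(score):
--     sums = [sum(r) for r in score]
--     return [1 + sum(1 for t in sums if t > s) for s in sums]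
-- ===== Notes on version B (the rewrite author's own statement) =====
-- stated objective: simpler
-- what changed: B drops the sort and the rank dictionary entirely: it computes each row's rank directly as 1 + the number of row sums strictly greater than its own, in a single counting comprehension.
import Mathlib
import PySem

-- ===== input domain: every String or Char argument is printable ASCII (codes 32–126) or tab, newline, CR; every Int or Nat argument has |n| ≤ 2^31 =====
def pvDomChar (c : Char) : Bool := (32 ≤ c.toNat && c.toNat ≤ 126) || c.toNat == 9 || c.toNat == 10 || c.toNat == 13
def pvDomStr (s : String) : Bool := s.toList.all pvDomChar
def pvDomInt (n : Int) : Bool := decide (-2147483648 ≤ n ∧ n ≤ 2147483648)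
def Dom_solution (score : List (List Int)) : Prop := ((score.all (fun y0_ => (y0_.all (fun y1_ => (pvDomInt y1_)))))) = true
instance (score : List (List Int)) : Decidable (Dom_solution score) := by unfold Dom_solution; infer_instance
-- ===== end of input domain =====

-- B drops A's sort and first-occurrence rank dictionary: each row's rank is computed
-- directly as 1 + the number of row sums strictly greater than its own (objective: simpler).

-- ===== PORT A =====
-- one step of A's first loop; state = (rank_dic, ranking)
def solutionStep (p : PySem.Dict Int Int × Int) (i : List Int) : PySem.Dict Int Int × Int :=
  let current_sum := i.sum
  if p.1.contains current_sum then (p.1, p.2 + 1)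
  else (p.1.insert current_sum p.2, p.2 + 1)

def solution (score : List (List Int)) : List Int :=
  let sorted_array := PySem.List.sorted score (fun x => x.sum) true
  let st := sorted_array.foldl solutionStep (PySem.Dict.empty, 1)
  -- rank_dic[sum(i)]: the key is always present (every sum over score occurs in
  -- sorted_array), so the `.getD 0` default is never taken and the port is exact
  score.foldl (fun answer i => answer ++ [(st.1.get? i.sum).getD 0]) []

-- ===== PORT B =====
def solution_alt (score : List (List Int)) : List Int :=
  let sums := score.map (fun r => r.sum)
  sums.map (fun s => 1 + (sums.countP (fun t => decide (s < t)) : Int))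

-- ===== PRECONDITION & SPEC =====
def Spec_solution (score : List (List Int)) (out : List Int) : Prop := out = solution_alt score
instance (score : List (List Int)) (out : List Int) : Decidable (Spec_solution score out) := by unfold Spec_solution; infer_instance

-- ===== CLAIM (what is proved, stated in full; the proofs are below) =====
def Claim_equal_solution : Prop := ∀ (score : List (List Int)), Dom_solution score → Spec_solution score (solution score)

-- ===== LEMMAS AND PROOFS =====

-- A's first loop maps a sum s occurring in the list to r + (index of s's first occurrence)
theorem solution_fold_get (l : List (List Int)) (d : PySem.Dict Int Int) (r : Int) (s : Int) :
    ((l.foldl solutionStep (d, r)).1).get? s =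
      if d.contains s then d.get? s
      else if s ∈ l.map (fun x => x.sum) then some (r + (l.map (fun x => x.sum)).idxOf s)
      else none := by
  induction l generalizing d r with
  | nil =>
    simp only [List.foldl_nil, List.map_nil, List.not_mem_nil, if_false]
    by_cases h : d.contains s
    · simp [h]
    · simp [h, (PySem.Dict.get?_eq_none_iff_contains d s).mpr (by simp_all)]
  | cons i t ih =>
    simp only [List.foldl_cons, List.map_cons]
    by_cases hc : d.contains i.sum
    · rw [show solutionStep (d, r) i = (d, r + 1) by simp [solutionStep, hc]]
      rw [ih]
      by_cases hd : d.contains s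
      · simp [hd]
      · have hne : s ≠ i.sum := fun h => hd (h ▸ hc)
        simp only [hd, List.mem_cons, List.idxOf_cons]
        have hb : (i.sum == s) = false := by simp [Ne.symm hne]
        simp only [hb, cond_false]
        by_cases hm : s ∈ t.map (fun x => x.sum)
        · simp only [hm, or_true, if_true, hne]
          simp only [Bool.false_eq_true, if_false, Option.some.injEq]
          push_cast
          ring
        · simp [hm, hne]
    · rw [show solutionStep (d, r) i = (d.insert i.sum r, r + 1) by simp [solutionStep, hc]]
      rw [ih]
      by_cases hd : d.contains s
      · have : (d.insert i.sum r).contains s := by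
          rw [PySem.Dict.contains_insert]; simp [hd]
        by_cases hse : s = i.sum
        · exact absurd (hse ▸ hd) (by simp [hc])
        · rw [PySem.Dict.get?_insert]
          simp [this, hd, hse]
      · by_cases hse : s = i.sum
        · have hcs : (d.insert i.sum r).contains s := by
            rw [hse]; exact PySem.Dict.contains_insert_self d i.sum r
          rw [PySem.Dict.get?_insert]
          simp only [hcs, hse, if_true, List.idxOf_cons, beq_self_eq_true,
            cond_true, Nat.cast_zero, add_zero, List.mem_cons, true_or, if_pos]
          simp [hc]
        · have hci : (d.insert i.sum r).contains s = d.contains s := by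
            rw [PySem.Dict.contains_insert]; simp [hse]
          rw [hci, PySem.Dict.get?_insert]
          simp only [hd, if_false, hse,
            (PySem.Dict.get?_eq_none_iff_contains d s).mpr (by simp_all)]
          simp only [List.mem_cons, List.idxOf_cons, hse, false_or]
          have hb : (i.sum == s) = false := by
            simp only [beq_eq_false_iff_ne, ne_eq]
            exact fun h => hse h.symm
          simp only [hb, cond_false]
          by_cases hm : s ∈ t.map (fun x => x.sum)
          · simp only [hm, if_true]
            simp only [Bool.false_eq_true, if_false, Option.some.injEq]
            push_cast
            ring
          · simp [hm, hd]

-- in a descending-sorted list, the index of s's first occurrence = #{elements > s}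
theorem idxOf_eq_countP_gt (L : List Int) (hp : L.Pairwise (fun a b => b ≤ a)) (s : Int)
    (hs : s ∈ L) : (L.idxOf s : Int) = (L.countP (fun t => decide (s < t)) : Int) := by
  induction L with
  | nil => cases hs
  | cons h t ih =>
    rcases List.pairwise_cons.mp hp with ⟨hall, ht⟩
    by_cases hsh : s = h
    · subst hsh
      have h0 : t.countP (fun t' => decide (s < t')) = 0 := by
        rw [List.countP_eq_zero]
        intro x hx
        simpa using not_lt.mpr (hall x hx)
      simp [List.idxOf_cons, List.countP_cons, h0]
    · have hst : s ∈ t := by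
        rcases List.mem_cons.mp hs with h1 | h1
        · exact absurd h1 hsh
        · exact h1
      have hlt : s < h := lt_of_le_of_ne (hall s hst) hsh
      have hb : (h == s) = false := by
        simp only [beq_eq_false_iff_ne, ne_eq]
        exact fun h1 => hsh h1.symm
      rw [List.idxOf_cons, List.countP_cons]
      simp only [hb, cond_false, hlt, decide_true, if_pos]
      push_cast
      rw [ih ht hst]

theorem foldl_append_singleton {α β : Type} (l : List α) (g : α → β) (acc : List β) :
    l.foldl (fun a i => a ++ [g i]) acc = acc ++ l.map g := by
  induction l generalizing acc with
  | nil => simp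
  | cons x xs ih => simp [ih]

theorem solution_eq (score : List (List Int)) : solution score = solution_alt score := by
  unfold solution solution_alt
  simp only [foldl_append_singleton, List.nil_append, List.map_map]
  apply List.map_congr_left
  intro i hi
  set sa := PySem.List.sorted score (fun x => x.sum) true with hsa
  have hperm : (sa.map (fun x => x.sum)).Perm (score.map (fun r => r.sum)) :=
    (PySem.List.sorted_perm score (fun x => x.sum) true).map _
  have hmem : i.sum ∈ sa.map (fun x => x.sum) :=
    hperm.mem_iff.mpr (List.mem_map.mpr ⟨i, hi, rfl⟩)
  have hpw : (sa.map (fun x => x.sum)).Pairwise (fun a b => b ≤ a) := by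
    rw [List.pairwise_map]
    exact PySem.List.sorted_pairwise_rev score (fun x => x.sum)
  rw [solution_fold_get]
  simp only [PySem.Dict.contains_empty, Bool.false_eq_true, if_false, hmem, if_true]
  rw [Option.getD_some]
  have := idxOf_eq_countP_gt _ hpw i.sum hmem
  rw [hperm.countP_eq] at this
  simp only [Function.comp] at this ⊢
  omega

-- ===== VERDICT (by name: the statement is the Claim_ definition above) =====
theorem solution_spec : Claim_equal_solution := by
  intro score _
  exact solution_eq score
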